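-- pv_equiv track=rewrite | github.com/tomerkatz2001/mtm2 | hw2.py | sumAllUp
-- ===== SOURCE A (Python) =====
-- def sumAllUp(type_set, type_dict):
--     '''
--     This method gets a dict and returns the results of the competitions(a list of the top 3 countries)
--     Arguments:
--         type_set- A set of all of the competitions from this type.
--         type_dict- A dictionary of this competition type, mapping each competition to the competitors, sorted by results.
--     '''
--     sum_list = []
--     for competition in type_set:#For each competition, add a list of the top 3 countries to the list, if there is less the 3 countries, add undef_country as countries.
--         size = len(type_dict[competition])
--         if (size == 0):
--             continue
--         if (size == 1):
--             sum_list.append(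
--                 [competition, type_dict[competition][0]["competitor country"], 'undef_country', 'undef_country'])
--         if (size == 2):
--             sum_list.append([competition, type_dict[competition][0]["competitor country"],
--                              type_dict[competition][1]["competitor country"], 'undef_country'])
--         if (size >= 3):
--             sum_list.append([competition, type_dict[competition][0]["competitor country"],
--                              type_dict[competition][1]["competitor country"],
--                              type_dict[competition][2]["competitor country"]])
--     return sum_list#Return the final list
-- ===== SOURCE B (Python) =====
-- def sumAllUp(type_set, type_dict):
--     # Recursive decomposition: peel competitions off the front, build the result
--     # back-to-front by consing; each row fills positions 0..2 by index-with-default.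
--     ts = list(type_set)
--     if not ts:
--         return []
--     comp, rest = ts[0], ts[1:]
--     tail = sumAllUp(rest, type_dict)
--     comps = type_dict[comp]
--     if not comps:
--         return tail
--     row = [comp] + [comps[i]["competitor country"] if i < len(comps) else 'undef_country'
--                     for i in range(3)]
--     return [row] + tail
-- ===== Notes on version B (the rewrite author's own statement) =====
-- stated objective: alternative
-- what changed: Replaces A's single append-accumulator loop with size==0/1/2/>=3 branch cascade by a recursive decomposition over type_set that conses rows built back-to-front, each row filled per position 0..2 via index-with-default instead of branching on the size.
import Mathlib
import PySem

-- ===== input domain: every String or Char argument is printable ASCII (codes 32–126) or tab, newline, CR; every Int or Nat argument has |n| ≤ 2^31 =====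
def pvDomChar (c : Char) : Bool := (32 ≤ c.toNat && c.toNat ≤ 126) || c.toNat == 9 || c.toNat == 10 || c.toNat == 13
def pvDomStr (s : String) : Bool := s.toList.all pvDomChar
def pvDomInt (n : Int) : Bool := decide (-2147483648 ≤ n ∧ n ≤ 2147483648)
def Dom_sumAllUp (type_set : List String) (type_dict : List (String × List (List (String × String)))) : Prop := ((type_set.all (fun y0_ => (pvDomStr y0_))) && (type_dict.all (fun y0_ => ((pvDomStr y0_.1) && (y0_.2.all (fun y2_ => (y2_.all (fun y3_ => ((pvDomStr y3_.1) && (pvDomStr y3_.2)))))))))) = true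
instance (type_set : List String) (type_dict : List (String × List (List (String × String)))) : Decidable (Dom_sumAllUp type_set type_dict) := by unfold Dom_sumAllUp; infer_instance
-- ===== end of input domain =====

-- B replaces A's append-accumulator loop with size branches by recursion consing rows built per index with a default; objective: alternative.

-- c["competitor country"]; total via a default, exact on Pre_ (where the key is present)
def pvCountry (c : List (String × String)) : String :=
  PySem.Dict.getD (PySem.Dict.mk c) "competitor country" ""

-- ===== PORT A =====
def sumAllUp (type_set : List String) (type_dict : List (String × List (List (String × String)))) : List (List String) :=
  type_set.foldl (fun sum_list competition =>
    let lst := PySem.Dict.getD (PySem.Dict.mk type_dict) competition []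
    let size := lst.length
    if size == 0 then sum_list
    else
      let s1 := if size == 1 then
          sum_list ++ [[competition, pvCountry (lst.getD 0 []), "undef_country", "undef_country"]]
        else sum_list
      let s2 := if size == 2 then
          s1 ++ [[competition, pvCountry (lst.getD 0 []), pvCountry (lst.getD 1 []), "undef_country"]]
        else s1
      if 3 ≤ size then
        s2 ++ [[competition, pvCountry (lst.getD 0 []), pvCountry (lst.getD 1 []), pvCountry (lst.getD 2 [])]]
      else s2) []

-- ===== PORT B =====
def sumAllUp_alt (type_set : List String) (type_dict : List (String × List (List (String × String)))) : List (List String) :=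
  match type_set with
  | [] => []
  | comp :: rest =>
    let tail := sumAllUp_alt rest type_dict
    let comps := PySem.Dict.getD (PySem.Dict.mk type_dict) comp []
    if comps.isEmpty then tail
    else
      (comp :: (PySem.List.pyRange 0 3 1).map (fun i =>
        if i < (comps.length : Int) then pvCountry (comps.getD i.toNat []) else "undef_country")) :: tail

-- ===== PRECONDITION & SPEC =====
-- Pre_: every competition in type_set is a key of type_dict (else A raises KeyError) and each of its
-- first three competitor dicts contains the "competitor country" key (else A raises KeyError).
def Pre_sumAllUp (type_set : List String) (type_dict : List (String × List (List (String × String)))) : Prop :=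
  ∀ c ∈ type_set,
    (PySem.Dict.contains (PySem.Dict.mk type_dict) c = true) ∧
    ∀ comp ∈ (PySem.Dict.getD (PySem.Dict.mk type_dict) c []).take 3,
      PySem.Dict.contains (PySem.Dict.mk comp) "competitor country" = true
instance (type_set : List String) (type_dict : List (String × List (List (String × String)))) : Decidable (Pre_sumAllUp type_set type_dict) := by unfold Pre_sumAllUp; infer_instance

def pvWitness_sumAllUp : List String × (List (String × List (List (String × String)))) :=
  (["a", "b"], [("a", [[("competitor country", "IL")]]), ("b", [])])

def Spec_sumAllUp (type_set : List String) (type_dict : List (String × List (List (String × String)))) (out : List (List String)) : Prop := out = sumAllUp_alt type_set type_dict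
instance (type_set : List String) (type_dict : List (String × List (List (String × String)))) (out : List (List String)) : Decidable (Spec_sumAllUp type_set type_dict out) := by unfold Spec_sumAllUp; infer_instance

-- ===== CLAIM =====
def Claim_equal_sumAllUp : Prop := ∀ (type_set : List String) (type_dict : List (String × List (List (String × String)))), Dom_sumAllUp type_set type_dict → Pre_sumAllUp type_set type_dict → Spec_sumAllUp type_set type_dict (sumAllUp type_set type_dict)

-- ===== LEMMAS AND PROOFS =====

-- A's per-element step, abbreviated for the lemmas below
def pvStepA (type_dict : List (String × List (List (String × String))))
    (sum_list : List (List String)) (competition : String) : List (List String) :=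
  let lst := PySem.Dict.getD (PySem.Dict.mk type_dict) competition []
  let size := lst.length
  if size == 0 then sum_list
  else
    let s1 := if size == 1 then
        sum_list ++ [[competition, pvCountry (lst.getD 0 []), "undef_country", "undef_country"]]
      else sum_list
    let s2 := if size == 2 then
        s1 ++ [[competition, pvCountry (lst.getD 0 []), pvCountry (lst.getD 1 []), "undef_country"]]
      else s1
    if 3 ≤ size then
      s2 ++ [[competition, pvCountry (lst.getD 0 []), pvCountry (lst.getD 1 []), pvCountry (lst.getD 2 [])]]
    else s2

theorem pyRange_03 : PySem.List.pyRange 0 3 1 = [0, 1, 2] := by decide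

-- A's step appends exactly the (zero or one) row that B conses for that competition
theorem step_row (type_dict : List (String × List (List (String × String))))
    (acc : List (List String)) (comp : String) :
    pvStepA type_dict acc comp =
    acc ++ (let comps := PySem.Dict.getD (PySem.Dict.mk type_dict) comp []
            if comps.isEmpty then []
            else [comp :: (PySem.List.pyRange 0 3 1).map (fun i =>
              if i < (comps.length : Int) then pvCountry (comps.getD i.toNat []) else "undef_country")]) := by
  unfold pvStepA
  simp only [pyRange_03]
  match (PySem.Dict.getD (PySem.Dict.mk type_dict) comp []) with
  | [] => simp
  | [a] => simp
  | [a, b] => simp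
  | a :: b :: c :: rest =>
    simp [List.getD]
    constructor <;> omega

theorem alt_cons (type_dict : List (String × List (List (String × String))))
    (comp : String) (rest : List String) :
    sumAllUp_alt (comp :: rest) type_dict =
    (let comps := PySem.Dict.getD (PySem.Dict.mk type_dict) comp []
     if comps.isEmpty then []
     else [comp :: (PySem.List.pyRange 0 3 1).map (fun i =>
       if i < (comps.length : Int) then pvCountry (comps.getD i.toNat []) else "undef_country")])
      ++ sumAllUp_alt rest type_dict := by
  show (if (PySem.Dict.getD (PySem.Dict.mk type_dict) comp []).isEmpty then sumAllUp_alt rest type_dict else _) = _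
  by_cases h : (PySem.Dict.getD (PySem.Dict.mk type_dict) comp []).isEmpty <;> simp [h]

theorem foldA_eq (type_dict : List (String × List (List (String × String)))) :
    ∀ (type_set : List String) (acc : List (List String)),
      type_set.foldl (pvStepA type_dict) acc = acc ++ sumAllUp_alt type_set type_dict := by
  intro type_set
  induction type_set with
  | nil => intro acc; simp [sumAllUp_alt]
  | cons comp rest ih =>
    intro acc
    rw [List.foldl_cons, ih, step_row, alt_cons, List.append_assoc]

-- ===== VERDICT =====
theorem sumAllUp_spec : Claim_equal_sumAllUp := by
  intro type_set type_dict _ _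
  show sumAllUp type_set type_dict = sumAllUp_alt type_set type_dict
  have : sumAllUp type_set type_dict = type_set.foldl (pvStepA type_dict) [] := rfl
  rw [this, foldA_eq]
  simp
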